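-- pv_equiv track=rewrite | github.com/Dhruv0705/Python | BSC/CAC190/Problem Set 5/LightMoreLight.py | ToggleLights
-- ===== SOURCE A (Python) =====
-- def ToggleLights(LightList):
--
--         # Empty counter Variable
--         WalkCounter = 1
--
--         # While the walkcounter is not less then the length of the LightList continue loop
--         while WalkCounter <= len(LightList):
--
--             # For index of i in range of lightList
--             for i in range(len(LightList)):
--
--                 # If walkcount is divisiabel by i+1 and is =0 then
--                 if (i+1) % WalkCounter == 0:
--
--                     # Lightlist index is not within the list
--                     LightList[i] = not LightList[i]
--
--             # Adds to counter
--             WalkCounter += 1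
--          # Returning the LightList
--         return LightList
-- ===== SOURCE B (Python) =====
-- def ToggleLights(LightList):
--     # A light ends up toggled iff its 1-based position has an odd number of
--     # divisors, i.e. iff it is a perfect square; toggle those in one pass.
--     # Mutates LightList in place and returns it, like A.
--     j = 1
--     while j * j <= len(LightList):
--         LightList[j * j - 1] = not LightList[j * j - 1]
--         j += 1
--     return LightList
-- ===== Notes on version B (the rewrite author's own statement) =====
-- stated objective: faster
-- what changed: Instead of n passes each scanning all n lights, B toggles exactly the perfect-square positions (the only positions with an odd divisor count) in a single O(sqrt(n)) walk.
import Mathlib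
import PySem

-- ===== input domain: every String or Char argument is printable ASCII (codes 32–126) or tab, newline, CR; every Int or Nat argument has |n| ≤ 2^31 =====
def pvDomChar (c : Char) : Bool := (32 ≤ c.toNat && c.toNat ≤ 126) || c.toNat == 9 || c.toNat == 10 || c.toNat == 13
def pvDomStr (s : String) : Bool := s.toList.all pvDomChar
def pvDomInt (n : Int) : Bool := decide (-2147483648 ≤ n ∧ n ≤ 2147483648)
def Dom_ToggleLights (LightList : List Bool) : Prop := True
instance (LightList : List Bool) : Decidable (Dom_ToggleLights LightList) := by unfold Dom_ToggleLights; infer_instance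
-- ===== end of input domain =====

-- B toggles exactly the perfect-square positions in one pass instead of A's n passes over n lights.
-- Both A and B mutate the Python list in place and return it; the equivalence proved here is about the return value.

-- ===== PORT A =====
-- one iteration of the inner 'for i in range(len(...))' loop body applied at every index
def pvPassA (k : Nat) (L : List Bool) : List Bool :=
  L.mapIdx (fun i b => if (i + 1) % k == 0 then !b else b)

-- the while loop: WalkCounter runs 1,2,…,len(LightList)
def ToggleLights (LightList : List Bool) : List Bool :=
  (List.range' 1 LightList.length).foldl (fun acc k => pvPassA k acc) LightList

-- ===== PORT B =====
-- the while loop of Source B: toggle position j*j-1 while j*j ≤ len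
def pvGoB (L : List Bool) (j : Nat) : List Bool :=
  if j * j ≤ L.length then
    pvGoB (L.set (j * j - 1) (! L.getD (j * j - 1) false)) (j + 1)
  else L
termination_by L.length + 1 - j
decreasing_by
  simp only [List.length_set]
  rcases Nat.eq_zero_or_pos j with h | h
  · omega
  · have : j ≤ j * j := Nat.le_mul_of_pos_left j h
    omega

def ToggleLights_alt (LightList : List Bool) : List Bool := pvGoB LightList 1

-- ===== PRECONDITION & SPEC =====
def Spec_ToggleLights (LightList : List Bool) (out : List Bool) : Prop := out = ToggleLights_alt LightList
instance (LightList : List Bool) (out : List Bool) : Decidable (Spec_ToggleLights LightList out) := by unfold Spec_ToggleLights; infer_instance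

-- ===== CLAIM (what is proved, stated in full; the proofs are below) =====
def Claim_equal_ToggleLights : Prop := ∀ (LightList : List Bool), Dom_ToggleLights LightList → Spec_ToggleLights LightList (ToggleLights LightList)

-- ===== LEMMAS AND PROOFS =====

theorem pvPassA_length (k : Nat) (L : List Bool) : (pvPassA k L).length = L.length := by
  simp [pvPassA]

theorem foldA_length (ks : List Nat) (L : List Bool) :
    (ks.foldl (fun acc k => pvPassA k acc) L).length = L.length := by
  induction ks generalizing L with
  | nil => rfl
  | cons k ks ih => simp [List.foldl, ih, pvPassA_length]

theorem pvPassA_getD (k : Nat) (L : List Bool) (i : Nat) (h : i < L.length) :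
    (pvPassA k L).getD i false = if (i + 1) % k == 0 then !(L.getD i false) else L.getD i false := by
  simp only [pvPassA, List.getD, List.getElem?_mapIdx, List.getElem?_eq_getElem h, Option.map_some,
    Option.getD_some]

theorem foldA_getD (ks : List Nat) (L : List Bool) (i : Nat) (h : i < L.length) :
    (ks.foldl (fun acc k => pvPassA k acc) L).getD i false =
      xor (ks.countP (fun k => (i + 1) % k == 0) % 2 == 1) (L.getD i false) := by
  induction ks generalizing L with
  | nil => simp
  | cons k ks ih =>
    have h' : i < (pvPassA k L).length := by rw [pvPassA_length]; exact h
    rw [List.foldl_cons, ih _ h', pvPassA_getD _ _ _ h, List.countP_cons]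
    set c := ks.countP (fun k => (i + 1) % k == 0) with hc
    by_cases hk : (i + 1) % k == 0
    · rcases Nat.mod_two_eq_zero_or_one c with hp | hp
      · have h1 : (c + 1) % 2 = 1 := by omega
        simp [hk, hp, h1]
      · have h1 : (c + 1) % 2 = 0 := by omega
        simp [hk, hp, h1]
    · simp [hk]

theorem pvGoB_length (L : List Bool) (j : Nat) : (pvGoB L j).length = L.length := by
  fun_induction pvGoB L j with
  | case1 L j h ih => rw [ih, List.length_set]
  | case2 => rfl

theorem pvGoB_getD (L : List Bool) (j : Nat) (hj : 1 ≤ j) (i : Nat) (h : i < L.length) :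
    (pvGoB L j).getD i false =
      xor ((List.range' j (i + 2 - j)).any (fun s => s * s == i + 1)) (L.getD i false) := by
  fun_induction pvGoB L j with
  | case2 L j hle =>
    have hfalse : (List.range' j (i + 2 - j)).any (fun s => s * s == i + 1) = false := by
      rw [List.any_eq_false]
      intro s hs
      rw [List.mem_range'_1] at hs
      simp only [beq_iff_eq]
      intro hss
      have h1 : j * j ≤ s * s := Nat.mul_le_mul hs.1 hs.1
      omega
    rw [hfalse]
    simp
  | case1 L j hle ih =>
    have hjj : 0 < j * j := Nat.mul_pos (by omega) (by omega)
    have hp : j * j - 1 < L.length := by omega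
    have h' : i < (L.set (j * j - 1) (! L.getD (j * j - 1) false)).length := by
      rw [List.length_set]; exact h
    rw [ih (by omega) h']
    have hstep : j * j < (j + 1) * (j + 1) := by nlinarith
    by_cases hi : i = j * j - 1
    · subst hi
      have hset : (L.set (j * j - 1) (! L.getD (j * j - 1) false)).getD (j * j - 1) false =
          ! L.getD (j * j - 1) false := by
        simp [List.getD, List.getElem?_set_self, hp, List.getElem?_eq_getElem hp]
      have htrue : (List.range' j (j * j - 1 + 2 - j)).any (fun s => s * s == j * j - 1 + 1) = true := by
        rw [List.any_eq_true]
        refine ⟨j, ?_, by simp; omega⟩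
        rw [List.mem_range'_1]
        have : j ≤ j * j := Nat.le_mul_of_pos_left j (by omega)
        omega
      have hfalse : (List.range' (j + 1) (j * j - 1 + 2 - (j + 1))).any
          (fun s => s * s == j * j - 1 + 1) = false := by
        rw [List.any_eq_false]
        intro s hs
        rw [List.mem_range'_1] at hs
        simp only [beq_iff_eq]
        intro hss
        have h1 : (j + 1) * (j + 1) ≤ s * s := Nat.mul_le_mul hs.1 hs.1
        omega
      rw [hset, htrue, hfalse]
      simp
    · have hset : (L.set (j * j - 1) (! L.getD (j * j - 1) false)).getD i false =
          L.getD i false := by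
        simp [List.getD, List.getElem?_set_ne (fun hh => hi hh.symm)]
      have hsame : (List.range' (j + 1) (i + 2 - (j + 1))).any (fun s => s * s == i + 1) =
          (List.range' j (i + 2 - j)).any (fun s => s * s == i + 1) := by
        rw [Bool.eq_iff_iff, List.any_eq_true, List.any_eq_true]
        constructor
        · rintro ⟨s, hs, hss⟩
          rw [List.mem_range'_1] at hs
          refine ⟨s, ?_, hss⟩
          rw [List.mem_range'_1]
          omega
        · rintro ⟨s, hs, hss⟩
          rw [List.mem_range'_1] at hs
          simp only [beq_iff_eq] at hss
          refine ⟨s, ?_, by simp [hss]⟩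
          rw [List.mem_range'_1]
          rcases Nat.lt_or_ge j s with hlt | hge
          · omega
          · exfalso
            have hsj : s = j := by omega
            subst hsj
            exact hi (by omega)
      rw [hset, hsame]

-- parity of the number of divisors: odd iff perfect square (pairing d ↔ m / d)
theorem odd_card_divisors_iff (m : Nat) (hm : 1 ≤ m) :
    Odd (m.divisors.card) ↔ ∃ s, s * s = m := by
  classical
  set S := m.divisors with hS
  set lo := S.filter (fun d => d * d < m) with hlo
  set hi := S.filter (fun d => m < d * d) with hhi
  set eqs := S.filter (fun d => d * d = m) with heqs
  have hm0 : m ≠ 0 := by omega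
  have hcard : S.card = eqs.card + (lo.card + hi.card) := by
    have h1 := Finset.card_filter_add_card_filter_not (s := S) (p := fun d => d * d = m)
    have h2 := Finset.card_filter_add_card_filter_not
      (s := S.filter (fun d => ¬ d * d = m)) (p := fun d => d * d < m)
    have e1 : (S.filter (fun d => ¬ d * d = m)).filter (fun d => d * d < m) = lo := by
      rw [hlo, Finset.filter_filter]
      apply Finset.filter_congr
      intro d _
      constructor
      · intro hh; exact hh.2
      · intro hh; exact ⟨by omega, hh⟩
    have e2 : (S.filter (fun d => ¬ d * d = m)).filter (fun d => ¬ d * d < m) = hi := by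
      rw [hhi, Finset.filter_filter]
      apply Finset.filter_congr
      intro d hd
      have hd' : d ∣ m := (Nat.mem_divisors.mp hd).1
      constructor
      · intro hh; omega
      · intro hh; constructor <;> omega
    rw [e1, e2] at h2
    rw [← heqs] at h1
    omega
  have hbij : lo.card = hi.card := by
    apply Finset.card_bij' (fun d _ => m / d) (fun d _ => m / d)
    · intro d hd
      rw [hlo, Finset.mem_filter, Nat.mem_divisors] at hd
      obtain ⟨⟨hdvd, _⟩, hlt⟩ := hd
      have hdpos : 0 < d := Nat.pos_of_dvd_of_pos hdvd (by omega)
      have heq : d * (m / d) = m := Nat.mul_div_cancel' hdvd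
      rw [hhi, Finset.mem_filter, Nat.mem_divisors]
      refine ⟨⟨Nat.div_dvd_of_dvd hdvd, hm0⟩, ?_⟩
      have hdlt : d < m / d := by
        by_contra hge
        push_neg at hge
        have h2 : d * (m / d) ≤ d * d := Nat.mul_le_mul_left d hge
        omega
      calc m = d * (m / d) := heq.symm
        _ < (m / d) * (m / d) := (Nat.mul_lt_mul_right (by omega)).mpr hdlt
    · intro d hd
      rw [hhi, Finset.mem_filter, Nat.mem_divisors] at hd
      obtain ⟨⟨hdvd, _⟩, hlt⟩ := hd
      have hdpos : 0 < d := Nat.pos_of_dvd_of_pos hdvd (by omega)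
      have heq : d * (m / d) = m := Nat.mul_div_cancel' hdvd
      have hqpos : 0 < m / d := Nat.div_pos (Nat.le_of_dvd (by omega) hdvd) hdpos
      rw [hlo, Finset.mem_filter, Nat.mem_divisors]
      refine ⟨⟨Nat.div_dvd_of_dvd hdvd, hm0⟩, ?_⟩
      have hqlt : m / d < d := by
        by_contra hge
        push_neg at hge
        have h2 : d * d ≤ d * (m / d) := Nat.mul_le_mul_left d hge
        omega
      calc m / d * (m / d) < m / d * d := (Nat.mul_lt_mul_left hqpos).mpr hqlt
        _ = m := by rw [Nat.mul_comm]; exact heq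
    · intro d hd
      rw [hlo, Finset.mem_filter, Nat.mem_divisors] at hd
      exact Nat.div_div_self hd.1.1 hm0
    · intro d hd
      rw [hhi, Finset.mem_filter, Nat.mem_divisors] at hd
      exact Nat.div_div_self hd.1.1 hm0
  constructor
  · intro hodd
    have hoe : Odd eqs.card := by
      rw [hcard] at hodd
      rcases hodd with ⟨t, ht⟩
      exact ⟨t - lo.card, by omega⟩
    have hne : eqs.Nonempty := by
      rcases hoe with ⟨t, ht⟩
      exact Finset.card_pos.mp (by omega)
    obtain ⟨d, hd⟩ := hne
    rw [heqs, Finset.mem_filter] at hd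
    exact ⟨d, hd.2⟩
  · rintro ⟨r, hr⟩
    have hrpos : 0 < r := by
      rcases Nat.eq_zero_or_pos r with h | h
      · subst h; omega
      · exact h
    have heq1 : eqs = {r} := by
      apply Finset.eq_singleton_iff_unique_mem.mpr
      constructor
      · rw [heqs, Finset.mem_filter, Nat.mem_divisors]
        exact ⟨⟨⟨r, hr.symm⟩, hm0⟩, hr⟩
      · intro d hd
        rw [heqs, Finset.mem_filter] at hd
        have hdr : d * d = r * r := by omega
        exact (mul_self_inj (Nat.zero_le d) (Nat.zero_le r)).mp hdr
    rw [hcard, heq1, Finset.card_singleton]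
    exact ⟨lo.card, by omega⟩

-- translate the list count over 1..n into the divisor-set cardinality
theorem countP_range'_eq_card (n m : Nat) (h1 : 1 ≤ m) (h2 : m ≤ n) :
    (List.range' 1 n).countP (fun k => m % k == 0) = m.divisors.card := by
  have hfilter : ((Finset.Ico 1 (n + 1)).filter (fun k => m % k = 0)).card =
      (List.range' 1 n).countP (fun k => m % k == 0) := by
    rw [Nat.Ico_eq_range']
    simp only [Finset.filter, Finset.card_mk]
    show ((List.range' 1 (n + 1 - 1)).filter (fun k => decide (m % k = 0))).length = _
    rw [List.countP_eq_length_filter]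
    congr 1
  rw [← hfilter]
  congr 1
  ext k
  rw [Finset.mem_filter, Finset.mem_Ico, Nat.mem_divisors]
  constructor
  · rintro ⟨⟨hk1, _⟩, hmod⟩
    exact ⟨Nat.dvd_of_mod_eq_zero hmod, by omega⟩
  · rintro ⟨hdvd, _⟩
    have hkpos : 0 < k := Nat.pos_of_dvd_of_pos hdvd (by omega)
    have hkle : k ≤ m := Nat.le_of_dvd (by omega) hdvd
    exact ⟨⟨hkpos, by omega⟩, Nat.mod_eq_zero_of_dvd hdvd⟩

theorem parity_key (n m : Nat) (h1 : 1 ≤ m) (h2 : m ≤ n) :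
    ((List.range' 1 n).countP (fun k => m % k == 0) % 2 == 1) =
      (List.range' 1 m).any (fun s => s * s == m) := by
  rw [countP_range'_eq_card n m h1 h2, Bool.eq_iff_iff, beq_iff_eq, List.any_eq_true]
  rw [← Nat.odd_iff, odd_card_divisors_iff m h1]
  constructor
  · rintro ⟨s, hs⟩
    have hspos : 0 < s := by
      rcases Nat.eq_zero_or_pos s with h | h
      · subst h; omega
      · exact h
    refine ⟨s, ?_, by simp [hs]⟩
    rw [List.mem_range'_1]
    exact ⟨hspos, by nlinarith⟩
  · rintro ⟨s, _, hs⟩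
    simp only [beq_iff_eq] at hs
    exact ⟨s, hs⟩

-- ===== VERDICT (by name: the statement is the Claim_ definition above) =====
theorem ToggleLights_spec : Claim_equal_ToggleLights := by
  unfold Claim_equal_ToggleLights Spec_ToggleLights
  intro L _
  unfold ToggleLights ToggleLights_alt
  have hlen : ((List.range' 1 L.length).foldl (fun acc k => pvPassA k acc) L).length = L.length :=
    foldA_length _ _
  have hlenB : (pvGoB L 1).length = L.length := pvGoB_length _ _
  apply List.ext_getElem (by omega)
  intro i hiA hiB
  have hi : i < L.length := by omega
  have hA := foldA_getD (List.range' 1 L.length) L i hi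
  have hB := pvGoB_getD L 1 (le_refl 1) i hi
  have hgA : ((List.range' 1 L.length).foldl (fun acc k => pvPassA k acc) L).getD i false =
      ((List.range' 1 L.length).foldl (fun acc k => pvPassA k acc) L)[i] :=
    List.getD_eq_getElem _ _ hiA
  have hgB : (pvGoB L 1).getD i false = (pvGoB L 1)[i] := List.getD_eq_getElem _ _ hiB
  have hrange : i + 2 - 1 = i + 1 := by omega
  rw [← hgA, ← hgB, hA, hB, hrange, parity_key L.length (i + 1) (by omega) (by omega)]
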